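-- pv_equiv track=rewrite | github.com/redlizzxy/EnvMeta | envmeta/geocycle/cell_renderer.py | _split_into_chains
-- ===== SOURCE A (Python) =====
-- from typing import Any
--
-- def _split_into_chains(segments: list[list[int]],
--                        steps: list[dict[str, Any]]) -> list[list[list[int]]]:
--     """把段列表分成链（chain）：连续段之间若化学物衔接则同链，否则新链。
--
--     例：segments=[[0:sqr], [1..5:Sox]]，steps[0].product=S-0 vs
--         steps[1].substrate=S2O3-2 → 两段不连通 → 两条独立链。
--     """
--     if not segments:
--         return []
--     chains: list[list[list[int]]] = [[segments[0]]]
--     for i in range(1, len(segments)):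
--         prev_prod = str(steps[segments[i - 1][-1]].get("product") or "")
--         cur_sub = str(steps[segments[i][0]].get("substrate") or "")
--         if prev_prod and cur_sub and prev_prod == cur_sub:
--             chains[-1].append(segments[i])
--         else:
--             chains.append([segments[i]])
--     return chains
-- ===== SOURCE B (Python) =====
-- def _split_into_chains(segments, steps):
--     """Recursive grouping: peel off one maximal chemically-linked run at a time."""
--     def linked(a, b):
--         prev_prod = str(steps[a[-1]].get("product") or "")
--         cur_sub = str(steps[b[0]].get("substrate") or "")
--         return bool(prev_prod) and bool(cur_sub) and prev_prod == cur_sub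
--
--     def chains_of(segs):
--         if not segs:
--             return []
--         k = 1
--         while k < len(segs) and linked(segs[k - 1], segs[k]):
--             k += 1
--         return [segs[:k]] + chains_of(segs[k:])
--
--     return chains_of(segments)
-- ===== Notes on version B (the rewrite author's own statement) =====
-- stated objective: alternative
-- what changed: Replaces A's single indexed loop that appends each segment to the last chain of a growing chains list with a recursive decomposition that peels off one maximal chemically-linked run (take_run) at a time and conses whole chains.
import Mathlib
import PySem

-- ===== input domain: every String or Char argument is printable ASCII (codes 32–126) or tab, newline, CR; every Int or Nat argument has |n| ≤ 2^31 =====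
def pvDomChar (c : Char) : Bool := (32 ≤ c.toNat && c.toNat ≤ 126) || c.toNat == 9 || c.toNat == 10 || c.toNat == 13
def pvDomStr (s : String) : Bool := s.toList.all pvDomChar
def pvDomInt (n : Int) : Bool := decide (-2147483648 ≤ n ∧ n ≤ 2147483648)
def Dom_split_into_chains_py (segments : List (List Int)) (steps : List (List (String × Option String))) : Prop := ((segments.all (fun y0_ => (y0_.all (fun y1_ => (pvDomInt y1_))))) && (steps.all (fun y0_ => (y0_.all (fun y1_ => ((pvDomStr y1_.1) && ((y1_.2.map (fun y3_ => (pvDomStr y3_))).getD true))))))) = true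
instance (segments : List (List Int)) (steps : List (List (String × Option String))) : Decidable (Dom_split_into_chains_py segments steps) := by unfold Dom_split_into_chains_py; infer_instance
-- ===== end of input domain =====

-- B re-implements the grouping as a recursive "peel one maximal linked run" decomposition
-- (span-style recursion) instead of A's single indexed loop that appends to the last chain;
-- objective: alternative decomposition, same cost.

-- ===== PORT A =====
-- literal transliteration of A: guard on empty, then a fold over range(1, len(segments))
-- that either extends the last chain in place or starts a new one.
def split_into_chains_py (segments : List (List Int)) (steps : List (List (String × Option String))) : List (List (List Int)) :=
  if segments = [] then []
  else
    (PySem.List.pyRange 1 (segments.length : Int) 1).foldl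
      (fun chains i =>
        let prev_prod :=
          (((PySem.Dict.mk (PySem.List.pyGetD steps
              (PySem.List.pyGetD (PySem.List.pyGetD segments (i - 1) []) (-1) 0) [])).get? "product").getD none).getD ""
        let cur_sub :=
          (((PySem.Dict.mk (PySem.List.pyGetD steps
              (PySem.List.pyGetD (PySem.List.pyGetD segments i []) 0 0) [])).get? "substrate").getD none).getD ""
        if prev_prod ≠ "" ∧ cur_sub ≠ "" ∧ prev_prod = cur_sub then
          chains.dropLast ++ [PySem.List.pyGetD chains (-1) [] ++ [PySem.List.pyGetD segments i []]]
        else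
          chains ++ [[PySem.List.pyGetD segments i []]])
      [[PySem.List.pyGetD segments 0 []]]

-- ===== PORT B =====
-- helper `linked` of Source B
def linked_alt (steps : List (List (String × Option String))) (a b : List Int) : Bool :=
  let prev_prod :=
    (((PySem.Dict.mk (PySem.List.pyGetD steps (PySem.List.pyGetD a (-1) 0) [])).get? "product").getD none).getD ""
  let cur_sub :=
    (((PySem.Dict.mk (PySem.List.pyGetD steps (PySem.List.pyGetD b 0 0) [])).get? "substrate").getD none).getD ""
  decide (prev_prod ≠ "") && decide (cur_sub ≠ "") && decide (prev_prod = cur_sub)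

-- helper `take_run` of Source B: the maximal run linked to `prev`, plus the remainder
def takeRun_alt (steps : List (List (String × Option String))) : List Int → List (List Int) → List (List Int) × List (List Int)
  | _, [] => ([], [])
  | prev, c :: rest =>
    if linked_alt steps prev c then
      ((c :: (takeRun_alt steps c rest).1), (takeRun_alt steps c rest).2)
    else ([], c :: rest)

theorem takeRun_alt_len (steps : List (List (String × Option String))) (prev : List Int) (rest : List (List Int)) :
    (takeRun_alt steps prev rest).2.length ≤ rest.length := by
  induction rest generalizing prev with
  | nil => simp [takeRun_alt]
  | cons c r ih =>
    simp only [takeRun_alt]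
    split
    · exact Nat.le_succ_of_le (ih c)
    · simp

-- helper `chains_of` of Source B
def chainsOf_alt (steps : List (List (String × Option String))) : List (List Int) → List (List (List Int))
  | [] => []
  | s :: rest =>
    (s :: (takeRun_alt steps s rest).1) :: chainsOf_alt steps (takeRun_alt steps s rest).2
termination_by segs => segs.length
decreasing_by
  simp only [List.length_cons]
  exact Nat.lt_succ_of_le (takeRun_alt_len steps s rest)

def split_into_chains_py_alt (segments : List (List Int)) (steps : List (List (String × Option String))) : List (List (List Int)) :=
  chainsOf_alt steps segments

-- ===== PRECONDITION & SPEC =====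
-- Pre_ excludes exactly the inputs on which A raises IndexError: some adjacent pair of
-- segments whose first member is empty / second member is empty, or whose linking step
-- index (last of the previous segment, first of the current one) is out of range of `steps`.
def Pre_split_into_chains_py (segments : List (List Int)) (steps : List (List (String × Option String))) : Prop :=
  (segments.zip segments.tail).all (fun pc =>
    (match pc.1.getLast? with
     | some a => decide (PySem.Raise.InRange steps.length a)
     | none => false) &&
    (match pc.2.head? with
     | some b => decide (PySem.Raise.InRange steps.length b)
     | none => false)) = true
instance (segments : List (List Int)) (steps : List (List (String × Option String))) : Decidable (Pre_split_into_chains_py segments steps) := by unfold Pre_split_into_chains_py; infer_instance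

def pvWitness_split_into_chains_py : List (List Int) × (List (List (String × Option String))) :=
  ([[0], [1]], [[("product", some "X")], [("substrate", some "X")]])

def Spec_split_into_chains_py (segments : List (List Int)) (steps : List (List (String × Option String))) (out : List (List (List Int))) : Prop := out = split_into_chains_py_alt segments steps
instance (segments : List (List Int)) (steps : List (List (String × Option String))) (out : List (List (List Int))) : Decidable (Spec_split_into_chains_py segments steps out) := by unfold Spec_split_into_chains_py; infer_instance

-- ===== CLAIM (what is proved, stated in full; the proofs are below) =====
def Claim_equal_split_into_chains_py : Prop := ∀ (segments : List (List Int)) (steps : List (List (String × Option String))), Dom_split_into_chains_py segments steps → Pre_split_into_chains_py segments steps → Spec_split_into_chains_py segments steps (split_into_chains_py segments steps)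

-- ===== LEMMAS AND PROOFS =====

-- A's loop body, abstracted over the two segments it reads (proof-only helper;
-- A's lambda is definitionally this applied to segments[i-1] and segments[i]).
def gA (steps : List (List (String × Option String))) (chains : List (List (List Int))) (p c : List Int) : List (List (List Int)) :=
  let prev_prod :=
    (((PySem.Dict.mk (PySem.List.pyGetD steps (PySem.List.pyGetD p (-1) 0) [])).get? "product").getD none).getD ""
  let cur_sub :=
    (((PySem.Dict.mk (PySem.List.pyGetD steps (PySem.List.pyGetD c 0 0) [])).get? "substrate").getD none).getD ""
  if prev_prod ≠ "" ∧ cur_sub ≠ "" ∧ prev_prod = cur_sub then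
    chains.dropLast ++ [PySem.List.pyGetD chains (-1) [] ++ [c]]
  else
    chains ++ [[c]]

theorem gA_eq_if (steps : List (List (String × Option String))) (chains : List (List (List Int))) (p c : List Int) :
    gA steps chains p c =
      if linked_alt steps p c then chains.dropLast ++ [PySem.List.pyGetD chains (-1) [] ++ [c]]
      else chains ++ [[c]] := by
  simp only [gA, linked_alt, Bool.and_eq_true, decide_eq_true_eq]
  split_ifs with h1 h2 <;> first | rfl | (exact absurd h1 (by tauto))

-- the indexed fold over range(1, len) is the fold over adjacent pairs
theorem idx2pairs {S : Type} (segs : List (List Int)) (g : S → List Int → List Int → S) :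
    ∀ (m k : Nat) (init : S), segs.length - (k + 1) = m →
      (PySem.List.pyRange ((k : Int) + 1) (segs.length : Int) 1).foldl
          (fun acc i => g acc (PySem.List.pyGetD segs (i - 1) []) (PySem.List.pyGetD segs i [])) init
        = ((segs.drop k).zip (segs.drop (k + 1))).foldl (fun acc pc => g acc pc.1 pc.2) init := by
  intro m
  induction m with
  | zero =>
    intro k init h
    have hlen : segs.length ≤ k + 1 := by omega
    rw [PySem.List.pyRange_one_eq_nil (by exact_mod_cast hlen)]
    rw [List.drop_eq_nil_of_le hlen, List.zip_nil_right]
    simp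
  | succ m ih =>
    intro k init h
    have hk1 : k + 1 < segs.length := by omega
    have hk : k < segs.length := by omega
    rw [PySem.List.pyRange_one_cons (by exact_mod_cast hk1)]
    rw [List.foldl_cons]
    have e1 : ((k : Int) + 1 - 1) = (k : Int) := by ring
    have e2 : ((k : Int) + 1) = ((k + 1 : Nat) : Int) := by push_cast; ring
    have e3 : ((k : Int) + 1 + 1) = ((k + 1 : Nat) : Int) + 1 := by push_cast; ring
    rw [show (g init (PySem.List.pyGetD segs ((k : Int) + 1 - 1) []) (PySem.List.pyGetD segs ((k : Int) + 1) []))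
          = g init segs[k] segs[k + 1] by
        rw [e1, e2, PySem.List.pyGetD_natCast, PySem.List.pyGetD_natCast,
            List.getD_eq_getElem _ _ hk, List.getD_eq_getElem _ _ hk1]]
    rw [e3, ih (k + 1) _ (by omega)]
    rw [List.drop_eq_getElem_cons hk, List.drop_eq_getElem_cons hk1]
    rw [List.zip_cons_cons, List.foldl_cons]

-- the pair fold, started on any accumulator C ++ [run], computes B's chains
theorem fold_pairs_eq_chains (steps : List (List (String × Option String))) :
    ∀ (rest : List (List Int)) (prev : List Int) (C : List (List (List Int))) (run : List (List Int)),
      ((prev :: rest).zip rest).foldl (fun acc pc => gA steps acc pc.1 pc.2) (C ++ [run])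
        = C ++ ((run ++ (takeRun_alt steps prev rest).1) :: chainsOf_alt steps (takeRun_alt steps prev rest).2) := by
  intro rest
  induction rest with
  | nil =>
    intro prev C run
    simp [takeRun_alt, chainsOf_alt]
  | cons c r ih =>
    intro prev C run
    rw [List.zip_cons_cons, List.foldl_cons]
    by_cases hl : linked_alt steps prev c
    · rw [show gA steps (C ++ [run]) (prev, c).1 (prev, c).2
            = C ++ [run ++ [c]] by
          simp [gA_eq_if, hl, PySem.List.pyGetD_neg_one_append_singleton]]
      rw [ih c C (run ++ [c])]
      simp only [takeRun_alt, hl, if_true]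
      simp
    · rw [show gA steps (C ++ [run]) (prev, c).1 (prev, c).2
            = (C ++ [run]) ++ [[c]] by
          simp [gA_eq_if, hl]]
      rw [ih c (C ++ [run]) [c]]
      simp only [takeRun_alt, hl, if_false, Bool.false_eq_true]
      rw [show chainsOf_alt steps (c :: r)
            = (c :: (takeRun_alt steps c r).1) :: chainsOf_alt steps (takeRun_alt steps c r).2 by
          rw [chainsOf_alt]]
      simp

-- ===== VERDICT (by name: the statement is the Claim_ definition above) =====
theorem split_into_chains_py_spec : Claim_equal_split_into_chains_py := by
  intro segments steps _dom _pre
  unfold Spec_split_into_chains_py split_into_chains_py split_into_chains_py_alt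
  cases segments with
  | nil => simp [chainsOf_alt]
  | cons s0 rest =>
    rw [if_neg (by simp)]
    have hbody :
        (fun (chains : List (List (List Int))) (i : Int) =>
          let prev_prod :=
            (((PySem.Dict.mk (PySem.List.pyGetD steps
                (PySem.List.pyGetD (PySem.List.pyGetD (s0 :: rest) (i - 1) []) (-1) 0) [])).get? "product").getD none).getD ""
          let cur_sub :=
            (((PySem.Dict.mk (PySem.List.pyGetD steps
                (PySem.List.pyGetD (PySem.List.pyGetD (s0 :: rest) i []) 0 0) [])).get? "substrate").getD none).getD ""
          if prev_prod ≠ "" ∧ cur_sub ≠ "" ∧ prev_prod = cur_sub then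
            chains.dropLast ++ [PySem.List.pyGetD chains (-1) [] ++ [PySem.List.pyGetD (s0 :: rest) i []]]
          else
            chains ++ [[PySem.List.pyGetD (s0 :: rest) i []]]) =
        (fun acc i => gA steps acc (PySem.List.pyGetD (s0 :: rest) (i - 1) []) (PySem.List.pyGetD (s0 :: rest) i [])) := rfl
    rw [hbody]
    have H := idx2pairs (s0 :: rest) (gA steps) ((s0 :: rest).length - 1) 0 ([] ++ [[s0]]) (by simp)
    norm_num at H
    simp only [PySem.List.pyGetD_zero_cons]
    rw [show ((s0 :: rest).length : Int) = (rest.length : Int) + 1 by simp, H]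
    have F := fold_pairs_eq_chains steps rest s0 [] [s0]
    norm_num at F
    rw [F, show chainsOf_alt steps (s0 :: rest)
          = (s0 :: (takeRun_alt steps s0 rest).1) :: chainsOf_alt steps (takeRun_alt steps s0 rest).2 by
        rw [chainsOf_alt]]
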